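-- pv_equiv track=rewrite | github.com/theurs/tb2 | utils.py | split_html
-- ===== SOURCE A (Python) =====
-- def split_html(text: str, max_length: int = 1500) -> list:
--     """
--     Split the given HTML text into chunks of maximum length, while preserving the integrity
--     of HTML tags. The function takes two arguments:
--
--     Parameters:
--         - text (str): The HTML text to be split.
--         - max_length (int): The maximum length of each chunk. Default is 1500.
--
--     Returns:
--         - list: A list of chunks, where each chunk is a part of the original text.
--
--     Raises:
--         - AssertionError: If the length of the text is less than or equal to 299.
--     """
--     if len(text) <= max_length:
--         return [text,]
--     def find_all(a_str, sub):
--         start = 0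
--         while True:
--             start = a_str.find(sub, start)
--             if start == -1:
--                 return
--             if sub.startswith('\n'):
--                 yield start+1
--             else:
--                 yield start+len(sub)
--             start += len(sub) # use start += 1 to find overlapping matches
--
--     # find all end tags positions with \n after them
--     positions = []
--     # ищем либо открывающий тег в начале, либо закрывающий в конце
--     tags = ['</b>\n','</a>\n','</pre>\n', '</code>\n',
--             '\n<b>', '\n<a>', '\n<pre>', '\n<code>']
--
--     for i in tags:
--         for j in find_all(text, i):
--             positions.append(j)
--
--     chunks = []
--
--     # нет ни одной найденной позиции, тупо режем по границе
--     if not positions: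
--         chunks.append(text[:max_length])
--         chunks += split_html(text[max_length:], max_length)
--         return chunks
--
--     for i in list(reversed(positions)):
--         if i < max_length:
--             chunks.append(text[:i])
--             chunks += split_html(text[i:], max_length)
--             return chunks
--
--     # позиции есть но нет такой по которой можно резать,
--     # значит придется резать просто по границе
--     chunks.append(text[:max_length])
--     chunks += split_html(text[max_length:], max_length)
--     return chunks
-- ===== SOURCE B (Python) =====
-- def split_html(text: str, max_length: int = 1500) -> list:
--     """Iterative re-implementation: walk the text with an offset, picking each cut
--     with a right-to-left bounded rfind per tag (highest-priority tag first) instead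
--     of rebuilding the full positions list and slicing the suffix on every step."""
--     # priority order = A's reversed tag list; offset 1 for '\n<...>' tags,
--     # len(tag) for '</...>\n' tags (cut right after the newline / right before '<')
--     tags = ['\n<code>', '\n<pre>', '\n<a>', '\n<b>',
--             '</code>\n', '</pre>\n', '</a>\n', '</b>\n']
--     chunks = []
--     o = 0
--     n = len(text)
--     while n - o > max_length:
--         cut = -1
--         for tag in tags:
--             off = 1 if tag[0] == '\n' else len(tag)
--             p = text.rfind(tag, o, o + max_length - off - 1 + len(tag))
--             if p != -1:
--                 cut = p + off
--                 break
--         if cut == -1: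
--             cut = o + max_length
--         chunks.append(text[o:cut])
--         o = cut
--     chunks.append(text[o:])
--     return chunks
-- ===== Notes on version B (the rewrite author's own statement) =====
-- stated objective: faster
-- what changed: A recursively re-slices the remaining text and re-scans the whole suffix for all 8 tags before every chunk; B walks the one fixed string with an offset and finds each cut with a single bounded rfind per tag (highest-priority tag first), so no suffix copies and no full re-scans are made.
import Mathlib
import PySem

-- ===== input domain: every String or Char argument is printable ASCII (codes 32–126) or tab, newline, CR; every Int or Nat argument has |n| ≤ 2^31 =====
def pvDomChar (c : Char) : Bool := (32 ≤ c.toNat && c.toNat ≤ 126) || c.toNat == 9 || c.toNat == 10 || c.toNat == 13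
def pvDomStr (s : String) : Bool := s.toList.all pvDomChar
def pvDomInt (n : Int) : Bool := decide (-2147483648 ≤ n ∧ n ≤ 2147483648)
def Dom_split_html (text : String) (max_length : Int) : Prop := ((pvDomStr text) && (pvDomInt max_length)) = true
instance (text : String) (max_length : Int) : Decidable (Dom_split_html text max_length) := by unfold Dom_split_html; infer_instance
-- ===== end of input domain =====

-- B replaces A's per-chunk re-scan (re-slice the suffix, rebuild all tag positions,
-- reverse, pick) by a single offset-driven loop over the fixed string that finds each
-- cut with one bounded rfind per tag; objective: faster (no per-chunk re-scan/re-slice).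

-- ===== PORT A =====
-- the eight tags, in A's list order
def pvTags : List (List Char) :=
  ["</b>\n".toList, "</a>\n".toList, "</pre>\n".toList, "</code>\n".toList,
   "\n<b>".toList, "\n<a>".toList, "\n<pre>".toList, "\n<code>".toList]

-- A's find_all generator: repeated a_str.find(sub, start), start += len(sub);
-- fuel a_str.length+1 bounds the number of yields (start strictly increases, ≤ len)
def pvFindAllAux (aStr sub : List Char) (start : Nat) (fuel : Nat) : List Int :=
  match fuel with
  | 0 => []
  | fuel + 1 =>
    let f := PySem.Chars.findFrom aStr sub (start : Int)
    if f = -1 then []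
    else
      let pos : Int := if PySem.Chars.startswith sub ['\n'] then f + 1 else f + (sub.length : Int)
      pos :: pvFindAllAux aStr sub (f.toNat + sub.length) fuel

def pvFindAll (aStr sub : List Char) : List Int := pvFindAllAux aStr sub 0 (aStr.length + 1)

-- A's recursion; fuel text.length+1 suffices whenever Pre_ holds (each chunk removes ≥ 1 char)
def pvSplitA : Nat → List Char → Int → List (List Char)
  | 0, _, _ => []
  | fuel + 1, text, m =>
    if (text.length : Int) ≤ m then [text]
    else
      let positions := pvTags.foldl (fun acc tag => acc ++ pvFindAll text tag) []
      if positions.isEmpty then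
        PySem.List.slice text none (some m) :: pvSplitA fuel (PySem.List.slice text (some m) none) m
      else
        match positions.reverse.find? (fun i => decide (i < m)) with
        | some i => PySem.List.slice text none (some i) :: pvSplitA fuel (PySem.List.slice text (some i) none) m
        | none => PySem.List.slice text none (some m) :: pvSplitA fuel (PySem.List.slice text (some m) none) m

def split_html (text : String) (max_length : Int) : List String :=
  (pvSplitA (text.toList.length + 1) text.toList max_length).map String.ofList

-- ===== PORT B =====
-- B's tag list (priority order) and its for-loop over tags with break (returns -1 like Source B's cut)
def pvTagsB : List (List Char) :=
  ["\n<code>".toList, "\n<pre>".toList, "\n<a>".toList, "\n<b>".toList,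
   "</code>\n".toList, "</pre>\n".toList, "</a>\n".toList, "</b>\n".toList]

def pvTryTags (text : List Char) (o m : Int) : List (List Char) → Int
  | [] => -1
  | tag :: rest =>
    let off : Int := if PySem.List.pyGet? tag 0 = some '\n' then 1 else (tag.length : Int)
    let p := PySem.Chars.rfindFrom text tag o (some (o + m - off - 1 + (tag.length : Int)))
    if p ≠ -1 then p + off else pvTryTags text o m rest

-- Source B's while loop, offset o advancing over the one fixed string; fuel as in port A
def pvSplitBAux : Nat → List Char → Int → Int → List (List Char) → List (List Char)
  | 0, _, _, _, chunks => chunks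
  | fuel + 1, text, o, m, chunks =>
    if (text.length : Int) - o > m then
      let c := pvTryTags text o m pvTagsB
      let cut := if c = -1 then o + m else c
      pvSplitBAux fuel text cut m (chunks ++ [PySem.List.slice text (some o) (some cut)])
    else chunks ++ [PySem.List.slice text (some o) none]

def split_html_alt (text : String) (max_length : Int) : List String :=
  (pvSplitBAux (text.toList.length + 1) text.toList 0 max_length []).map String.ofList

-- ===== PRECONDITION & SPEC =====
-- Pre_ excludes exactly the inputs on which A never returns: max_length ≤ 0 with a longer
-- text makes A recurse forever on an unshrinking suffix (RecursionError).
def Pre_split_html (text : String) (max_length : Int) : Prop :=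
  1 ≤ max_length ∨ PySem.Str.len text ≤ max_length
instance (text : String) (max_length : Int) : Decidable (Pre_split_html text max_length) := by
  unfold Pre_split_html; infer_instance

def pvWitness_split_html : String × Int := ("<b>hello</b>\nworld", 7)

def Spec_split_html (text : String) (max_length : Int) (out : List String) : Prop := out = split_html_alt text max_length
instance (text : String) (max_length : Int) (out : List String) : Decidable (Spec_split_html text max_length out) := by unfold Spec_split_html; infer_instance

-- ===== CLAIM (what is proved, stated in full; the proofs are below) =====
def Claim_equal_split_html : Prop := ∀ (text : String) (max_length : Int), Dom_split_html text max_length → Pre_split_html text max_length → Spec_split_html text max_length (split_html text max_length)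

-- ===== LEMMAS AND PROOFS =====

-- occurrence bookkeeping (proof-side only)
def pvOff (tag : List Char) : Int :=
  if PySem.Chars.startswith tag ['\n'] then 1 else (tag.length : Int)

-- first character of the tag never recurs inside it: occurrences cannot overlap
def pvGood (tag : List Char) : Bool :=
  !tag.isEmpty && (List.range tag.length).all (fun k => k == 0 || tag[k]? != tag[0]?)

def pvOccP (t tag : List Char) (start : Nat) (q : Nat) : Bool :=
  decide (start ≤ q) && tag.isPrefixOf (t.drop q)

def pvOccs (t tag : List Char) (start : Nat) : List Nat :=
  (List.range (t.length + 1)).filter (pvOccP t tag start)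

def pvBestQ (t tag : List Char) (m : Int) : Option Nat :=
  ((List.range (t.length + 1)).filter
      (fun q => tag.isPrefixOf (t.drop q) && decide ((q : Int) + pvOff tag < m))).getLast?

theorem pv_sep (t tag : List Char) (hg : pvGood tag = true) (p q : Nat)
    (hp : tag.isPrefixOf (t.drop p) = true) (hq : tag.isPrefixOf (t.drop q) = true)
    (hlt : p < q) : p + tag.length ≤ q := by
  by_contra hcon
  have hp' := List.isPrefixOf_iff_prefix.mp hp
  have hq' := List.isPrefixOf_iff_prefix.mp hq
  unfold pvGood at hg
  simp only [Bool.and_eq_true, List.all_eq_true, List.mem_range] at hg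
  obtain ⟨hne, huniq⟩ := hg
  have hlen : 0 < tag.length := List.length_pos_iff.mpr (by simpa using hne)
  set k := q - p with hk
  have hk1 : 0 < k := by omega
  have hk2 : k < tag.length := by omega
  -- tag[k] = t[q] from hp', tag[0] = t[q] from hq'
  have hlp : tag.length ≤ (t.drop p).length := hp'.length_le
  have hlq : tag.length ≤ (t.drop q).length := hq'.length_le
  have hql : q < t.length := by simp at hlq; omega
  have e1 : tag[k]'hk2 = t[q]'hql := by
    have h0 := hp'.getElem (i := k) hk2
    rw [List.getElem_drop] at h0
    rw [h0]
    congr 1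
    omega
  have e2 : tag[0]'hlen = t[q]'hql := by
    have h0 := hq'.getElem (i := 0) hlen
    rw [List.getElem_drop] at h0
    rw [h0]
    simp
  have := huniq k hk2
  simp only [beq_iff_eq, bne_iff_ne, Bool.or_eq_true] at this
  rcases this with h | h
  · omega
  · apply h
    rw [List.getElem?_eq_getElem hk2, List.getElem?_eq_getElem hlen, e1, e2]

theorem pv_last_none (P : Nat → Bool) (n : Nat) :
    ((List.range n).filter P).getLast? = none ↔ ∀ q, q < n → P q = false := by
  induction n with
  | zero => simp
  | succ n ih =>
    rw [List.range_succ, List.filter_append, List.getLast?_append]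
    by_cases hP : P n
    · simp only [List.filter_cons, List.filter_nil, if_pos hP, List.getLast?_singleton,
        Option.some_or]
      constructor
      · intro h; exact absurd h (by simp)
      · intro h; exact absurd (h n (by omega)) (by simp [hP])
    · simp only [List.filter_cons, List.filter_nil, if_neg (by simp [hP] : ¬(P n = true)),
        List.getLast?_nil, Option.none_or, ih]
      constructor
      · intro h q hq
        rcases Nat.lt_succ_iff_lt_or_eq.mp hq with h1 | rfl
        · exact h q h1
        · simpa using hP
      · exact fun h q hq => h q (by omega)


theorem pv_rfind_go_eq (s sub : List Char) (j : Nat) :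
    PySem.Chars.rfind.go s sub j =
      match ((List.range (j + 1)).filter (fun i => sub.isPrefixOf (s.drop i))).getLast? with
      | some i => (i : Int)
      | none => -1 := by
  induction j with
  | zero =>
    simp only [PySem.Chars.rfind.go]
    by_cases h : sub.isPrefixOf s
    · simp [h, List.range_succ]
    · simp [h, List.range_succ]
  | succ j ih =>
    show (if sub.isPrefixOf (List.drop (j + 1) s) = true then ((j+1 : Nat) : Int) else PySem.Chars.rfind.go s sub j) = _
    rw [List.range_succ, List.filter_append, List.getLast?_append]
    by_cases h : sub.isPrefixOf (s.drop (j+1))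
    · simp [h]
    · simp only [List.filter_cons, List.filter_nil,
        if_neg (by simp [h] : ¬(sub.isPrefixOf (List.drop (j + 1) s) = true)),
        List.getLast?_nil, Option.none_or]
      exact ih

theorem pv_window_filter (T tag : List Char) (m : Int) (K : Nat)
    (hK : K ≤ T.length)
    (hKval : (K : Int) = min (T.length : Int) (m - 1 - pvOff tag + (tag.length : Int))) :
    (List.range ((T.take K).length + 1)).filter (fun i => tag.isPrefixOf ((T.take K).drop i)) =
      (List.range (T.length + 1)).filter
        (fun i => tag.isPrefixOf (T.drop i) && decide ((i : Int) + pvOff tag < m)) := by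
  have hlen : (T.take K).length = K := by simp [hK]
  rw [hlen]
  have hsplit : List.range (T.length + 1) = List.range (K + 1) ++ List.range' (K + 1) (T.length - K) := by
    rw [show T.length + 1 = (K + 1) + (T.length - K) by omega, List.range_add,
      List.range'_eq_map_range]
  rw [hsplit, List.filter_append]
  have hext : (List.range' (K + 1) (T.length - K)).filter
      (fun i => tag.isPrefixOf (T.drop i) && decide ((i : Int) + pvOff tag < m)) = [] := by
    rw [List.filter_eq_nil_iff]
    intro i hi
    rw [List.mem_range'] at hi
    simp only [Bool.and_eq_true, decide_eq_true_eq, not_and]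
    intro hpre hb
    have hp := List.isPrefixOf_iff_prefix.mp hpre
    have h1 : i + tag.length ≤ T.length := by
      have := hp.length_le
      simp at this
      omega
    omega
  rw [hext, List.append_nil]
  apply List.filter_congr
  intro i hi
  rw [List.mem_range] at hi
  have hdt : (T.take K).drop i = (T.drop i).take (K - i) := List.drop_take
  rw [hdt]
  by_cases hpre : tag.isPrefixOf (T.drop i)
  · have hp := List.isPrefixOf_iff_prefix.mp hpre
    have h1 : i + tag.length ≤ T.length := by
      have := hp.length_le
      simp at this
      omega
    by_cases hb : (i : Int) + pvOff tag < m
    · have : tag <+: (T.drop i).take (K - i) := by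
        rw [List.prefix_take_iff]
        exact ⟨hp, by omega⟩
      simp [List.isPrefixOf_iff_prefix.mpr this, hpre, hb]
    · have : ¬ (tag <+: (T.drop i).take (K - i)) := by
        rw [List.prefix_take_iff]
        rintro ⟨-, h2⟩
        omega
      simp only [hb, decide_false, Bool.and_false]
      rw [← Bool.not_eq_true, List.isPrefixOf_iff_prefix]
      exact this
  · have : ¬ (tag <+: (T.drop i).take (K - i)) := fun h => hpre (List.isPrefixOf_iff_prefix.mpr (h.trans (List.take_prefix _ _)))
    have h2 : tag.isPrefixOf ((T.drop i).take (K - i)) = false := by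
      rw [← Bool.not_eq_true, List.isPrefixOf_iff_prefix]
      exact this
    rw [h2, eq_comm, Bool.and_eq_false_iff]
    left
    exact Bool.not_eq_true _ |>.mp hpre

theorem pv_tag_sel (s tag : List Char) (o : Nat) (m : Int) (htag : tag ≠ [])
    (hm : 1 ≤ m) (ho : o ≤ s.length) :
    PySem.Chars.rfindFrom s tag (o : Int) (some ((o : Int) + m - pvOff tag - 1 + (tag.length : Int))) =
      match pvBestQ (s.drop o) tag m with
      | some q => (o : Int) + (q : Int)
      | none => -1 := by
  have htlen : 0 < tag.length := List.length_pos_iff.mpr htag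
  have hofflb : 1 ≤ pvOff tag := by
    unfold pvOff; split
    · omega
    · omega
  have hoffub : pvOff tag ≤ (tag.length : Int) := by
    unfold pvOff; split
    · omega
    · omega
  set e : Int := (o : Int) + m - pvOff tag - 1 + (tag.length : Int) with he
  have he0 : 0 ≤ e := by omega
  simp only [PySem.Chars.rfindFrom]
  have h1 : ¬((o : Int) < 0) := by omega
  have h2 : ¬(e < 0) := by omega
  simp only [if_neg h1, if_neg h2, Int.toNat_natCast]
  by_cases hlt : (if (s.length : Int) < e then (s.length : Int) else e) < (o : Int)
  · rw [if_pos hlt]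
    have hEe : e < (o : Int) := by
      by_cases hc : (s.length : Int) < e
      · rw [if_pos hc] at hlt; omega
      · rwa [if_neg hc] at hlt
    have hnone : pvBestQ (s.drop o) tag m = none := by
      unfold pvBestQ
      rw [pv_last_none]
      intro q hq
      rw [Bool.and_eq_false_iff]
      by_cases hpre : tag.isPrefixOf ((s.drop o).drop q)
      · right
        have hp := List.isPrefixOf_iff_prefix.mp hpre
        have hl : q + tag.length ≤ s.length - o := by
          have := hp.length_le
          simp at this
          omega
        simp only [decide_eq_false_iff_not, not_lt]
        omega
      · left
        exact Bool.not_eq_true _ |>.mp hpre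
    rw [hnone]
  · rw [if_neg hlt]
    rw [not_lt] at hlt
    set E : Int := (if (s.length : Int) < e then (s.length : Int) else e) with hE
    have hE0 : 0 ≤ E := by
      by_cases hc : (s.length : Int) < e
      · rw [hE, if_pos hc]; omega
      · rw [hE, if_neg hc]; omega
    set K : Nat := E.toNat - o with hKdef
    have hKval : (K : Int) = min ((s.drop o).length : Int) (m - 1 - pvOff tag + (tag.length : Int)) := by
      simp only [List.length_drop]
      by_cases hc : (s.length : Int) < e
      · rw [hE, if_pos hc] at *
        omega
      · rw [hE, if_neg hc] at *
        omega
    have hKle : K ≤ (s.drop o).length := by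
      have := hKval
      simp only [List.length_drop] at this
      omega
    have hdrop : List.drop o (List.take E.toNat s) = (s.drop o).take K := by
      rw [List.drop_take, hKdef]
    rw [hdrop]
    show (if PySem.Chars.rfind ((s.drop o).take K) tag = -1 then -1
      else (o : Int) + PySem.Chars.rfind ((s.drop o).take K) tag) = _
    unfold PySem.Chars.rfind
    rw [pv_rfind_go_eq, pv_window_filter (s.drop o) tag m K hKle hKval]
    unfold pvBestQ
    rcases ((List.range ((s.drop o).length + 1)).filter
        (fun q => tag.isPrefixOf ((s.drop o).drop q) && decide ((q : Int) + pvOff tag < m))).getLast? with _ | q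
    · simp
    · simp

theorem pv_filter_range_cons (P Q : Nat → Bool) (n a : Nat) (ha : a < n)
    (hPa : P a = true) (hbelow : ∀ q, q < a → P q = false) (hQlow : ∀ q, q ≤ a → Q q = false)
    (hagree : ∀ q, a < q → q < n → P q = Q q) :
    (List.range n).filter P = a :: (List.range n).filter Q := by
  have hsplit : List.range n = List.range a ++ a :: List.range' (a + 1) (n - a - 1) := by
    have h1 : List.range a ++ List.range' (0 + a) (n - a) = List.range' 0 (a + (n - a)) := by
      rw [List.range_eq_range']
      exact List.range'_append_1
    simp only [Nat.zero_add] at h1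
    rw [List.range_eq_range', show n = a + (n - a) by omega, ← h1,
      show n - a = (n - a - 1) + 1 by omega, List.range'_succ]
    simp [List.range_eq_range']
  have e1 : List.filter P (List.range a) = [] := by
    rw [List.filter_eq_nil_iff]; intro q hq; simp [hbelow q (List.mem_range.mp hq)]
  have e2 : List.filter Q (List.range a) = [] := by
    rw [List.filter_eq_nil_iff]; intro q hq; simp [hQlow q (le_of_lt (List.mem_range.mp hq))]
  rw [hsplit, List.filter_append, List.filter_append, e1, e2, List.nil_append, List.nil_append,
    List.filter_cons, List.filter_cons, if_pos hPa,
    if_neg (by simp [hQlow a (le_refl a)] : ¬(Q a = true))]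
  congr 1
  apply List.filter_congr
  intro q hq
  rw [List.mem_range'] at hq
  exact hagree q (by omega) (by omega)


theorem pv_findAllAux_eq (t tag : List Char) (hg : pvGood tag = true) :
    ∀ (fuel start : Nat), start ≤ t.length → t.length + 1 ≤ fuel + start →
    pvFindAllAux t tag start fuel = (pvOccs t tag start).map (fun q : Nat => (q : Int) + pvOff tag) := by
  have htag : tag ≠ [] := by
    unfold pvGood at hg
    simp only [Bool.and_eq_true] at hg
    simpa using hg.1
  have htlen : 0 < tag.length := List.length_pos_iff.mpr htag
  intro fuel
  induction fuel with
  | zero => intro start h1 h2; omega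
  | succ fuel ih =>
    intro start h1 h2
    show (if PySem.Chars.findFrom t tag (start : Nat) none = -1 then [] else _) = _
    by_cases hf : PySem.Chars.findFrom t tag (start : Nat) none = -1
    · rw [if_pos hf]
      rw [PySem.Chars.findFrom_natCast_eq_neg_one_iff t tag start h1] at hf
      have hocc : pvOccs t tag start = [] := by
        unfold pvOccs
        rw [List.filter_eq_nil_iff]
        intro q hq
        unfold pvOccP
        simp only [Bool.and_eq_true, decide_eq_true_eq, not_and, List.isPrefixOf_iff_prefix]
        intro hs hpre
        apply hf
        rw [← PySem.Chars.isIn_iff_infix, ← PySem.Chars.exists_prefix_drop_iff_isIn]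
        exact ⟨q - start, by rwa [List.drop_drop, Nat.add_comm, Nat.sub_add_cancel hs]⟩
      rw [hocc]; rfl
    · rw [if_neg hf]
      obtain ⟨hstf, hpref, hmin⟩ := PySem.Chars.findFrom_natCast_spec t tag start h1 hf
      set f := PySem.Chars.findFrom t tag (start : Nat) none with hfdef
      have hf0 : 0 ≤ f := le_trans (by omega) hstf
      have hflen : f.toNat + tag.length ≤ t.length := by
        have := hpref.length_le
        simp at this
        omega
      have hcons : pvOccs t tag start = f.toNat :: pvOccs t tag (f.toNat + tag.length) := by
        unfold pvOccs
        apply pv_filter_range_cons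
        · omega
        · unfold pvOccP
          simp only [Bool.and_eq_true, decide_eq_true_eq]
          exact ⟨by omega, List.isPrefixOf_iff_prefix.mpr hpref⟩
        · intro q hq
          unfold pvOccP
          rw [Bool.and_eq_false_iff]
          by_cases hs : start ≤ q
          · right
            rw [← Bool.not_eq_true, List.isPrefixOf_iff_prefix]
            exact hmin q (by exact_mod_cast hs) (by omega)
          · left; simpa using hs
        · intro q hq
          unfold pvOccP
          rw [Bool.and_eq_false_iff]
          left
          simp only [decide_eq_false_iff_not, not_le]
          omega
        · intro q hq1 hq2
          unfold pvOccP
          by_cases hpre : tag.isPrefixOf (t.drop q)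
          · have := pv_sep t tag hg f.toNat q (List.isPrefixOf_iff_prefix.mpr hpref) hpre hq1
            rw [decide_eq_true (by omega : start ≤ q),
              decide_eq_true (by omega : f.toNat + tag.length ≤ q)]
          · rw [Bool.not_eq_true] at hpre
            simp [hpre]
      rw [hcons]
      rw [List.map_cons]
      congr 1
      · show (if PySem.Chars.startswith tag ['\n'] then f + 1 else f + (tag.length : Int)) = _
        unfold pvOff
        split
        · omega
        · omega
      · exact ih (f.toNat + tag.length) (by omega) (by omega)


theorem pv_bestA (t tag : List Char) (hg : pvGood tag = true) (m : Int) :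
    ((pvFindAll t tag).reverse).find? (fun i => decide (i < m)) =
      (pvBestQ t tag m).map (fun q : Nat => (q : Int) + pvOff tag) := by
  rw [pvFindAll, pv_findAllAux_eq t tag hg (t.length + 1) 0 (by omega) (by omega)]
  rw [← List.map_reverse, List.find?_map, ← List.getLast?_filter]
  congr 1
  unfold pvBestQ pvOccs
  congr 1
  rw [List.filter_filter]
  apply List.filter_congr
  intro q hq
  unfold pvOccP
  simp [Bool.and_comm]

-- Source B's off computation agrees with A's startswith test
theorem pvOffB_eq (tag : List Char) :
    (if PySem.List.pyGet? tag 0 = some '\n' then (1 : Int) else (tag.length : Int)) = pvOff tag := by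
  unfold pvOff
  have h : (PySem.List.pyGet? tag 0 = some '\n') ↔ (PySem.Chars.startswith tag ['\n'] = true) := by
    cases tag with
    | nil => decide
    | cons c cs =>
      rw [PySem.List.pyGet?_zero_cons, PySem.Chars.startswith_iff, List.cons_prefix_cons]
      simp [eq_comm]
  simp only [h]

-- B's for-loop over any good tag list equals the or-chain of per-tag reversed scans
theorem pv_chain (s : List Char) (o : Nat) (m : Int) (hm : 1 ≤ m) (ho : o ≤ s.length) :
    ∀ L : List (List Char), (∀ tag ∈ L, pvGood tag = true) →
    pvTryTags s (o : Int) m L =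
      match L.foldr (fun tag acc =>
          (((pvFindAll (s.drop o) tag).reverse).find? (fun i => decide (i < m))).or acc) none with
      | some i => (o : Int) + i
      | none => -1 := by
  intro L
  induction L with
  | nil => intro _; rfl
  | cons tag L ih =>
    intro hL
    have hg : pvGood tag = true := hL tag (by simp)
    have htag : tag ≠ [] := by
      unfold pvGood at hg
      simp only [Bool.and_eq_true] at hg
      simpa using hg.1
    show (if PySem.Chars.rfindFrom s tag (o : Int)
        (some (((o : Int) + m - if PySem.List.pyGet? tag 0 = some '\n' then (1 : Int) else (tag.length : Int)) - 1 + (tag.length : Int))) ≠ -1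
      then PySem.Chars.rfindFrom s tag (o : Int)
        (some (((o : Int) + m - if PySem.List.pyGet? tag 0 = some '\n' then (1 : Int) else (tag.length : Int)) - 1 + (tag.length : Int))) +
        (if PySem.List.pyGet? tag 0 = some '\n' then (1 : Int) else (tag.length : Int))
      else pvTryTags s (o : Int) m L) = _
    rw [pvOffB_eq, pv_tag_sel s tag o m htag hm ho, List.foldr_cons,
      pv_bestA (s.drop o) tag hg m, ih (fun t ht => hL t (by simp [ht]))]
    rcases pvBestQ (s.drop o) tag m with _ | q
    · simp
    · simp only [Option.map_some, Option.some_or]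
      rw [if_pos (show ¬((o : Int) + (q : Int) = -1) by omega)]
      ring

-- B's tag loop equals A's reversed-positions scan, in global coordinates
theorem pv_sel_step (s : List Char) (o : Nat) (m : Int) (hm : 1 ≤ m) (ho : o ≤ s.length) :
    pvTryTags s (o : Int) m pvTagsB =
      match ((pvTags.foldl (fun acc tag => acc ++ pvFindAll (s.drop o) tag) []).reverse).find?
          (fun i => decide (i < m)) with
      | some i => (o : Int) + i
      | none => -1 := by
  rw [pv_chain s o m hm ho pvTagsB (by decide)]
  congr 1
  simp only [pvTags, pvTagsB, List.foldl, List.foldr, List.nil_append, List.reverse_append,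
    List.find?_append, Option.or_none]

-- every produced position is a usable cut: 1 ≤ i ≤ len
theorem pv_findAll_mem_bounds (t tag : List Char) (hg : pvGood tag = true) (i : Int)
    (h : i ∈ pvFindAll t tag) : 1 ≤ i ∧ i ≤ (t.length : Int) := by
  have htag : tag ≠ [] := by
    unfold pvGood at hg
    simp only [Bool.and_eq_true] at hg
    simpa using hg.1
  have htlen : 0 < tag.length := List.length_pos_iff.mpr htag
  have hofflb : 1 ≤ pvOff tag := by
    unfold pvOff; split
    · omega
    · omega
  have hoffub : pvOff tag ≤ (tag.length : Int) := by
    unfold pvOff; split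
    · omega
    · omega
  rw [pvFindAll, pv_findAllAux_eq t tag hg (t.length + 1) 0 (by omega) (by omega)] at h
  rw [List.mem_map] at h
  obtain ⟨q, hq, rfl⟩ := h
  unfold pvOccs at hq
  rw [List.mem_filter] at hq
  obtain ⟨-, hq2⟩ := hq
  unfold pvOccP at hq2
  rw [Bool.and_eq_true] at hq2
  have hpre := List.isPrefixOf_iff_prefix.mp hq2.2
  have hlenq : q + tag.length ≤ t.length := by
    have := hpre.length_le
    simp at this
    omega
  constructor
  · omega
  · omega

theorem pv_pos_mem (t : List Char) (i : Int)
    (h : i ∈ pvTags.foldl (fun acc tag => acc ++ pvFindAll t tag) []) :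
    1 ≤ i ∧ i ≤ (t.length : Int) := by
  simp only [pvTags, List.foldl, List.nil_append, List.mem_append] at h
  rcases h with ((((((h | h) | h) | h) | h) | h) | h) | h <;>
    exact pv_findAll_mem_bounds t _ (by decide) i h

theorem pv_main : ∀ (fuel : Nat) (s : List Char) (o : Nat) (m : Int) (acc : List (List Char)),
    1 ≤ m → o ≤ s.length → s.length + 1 ≤ fuel + o →
    pvSplitBAux fuel s (o : Int) m acc = acc ++ pvSplitA fuel (s.drop o) m := by
  intro fuel
  induction fuel with
  | zero => intro s o m acc hm ho hfuel; omega
  | succ fuel ih =>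
    intro s o m acc hm ho hfuel
    simp only [pvSplitBAux, pvSplitA]
    have hlen : ((s.drop o).length : Int) = (s.length : Int) - (o : Int) := by
      simp [List.length_drop]
      omega
    by_cases hle : ((s.drop o).length : Int) ≤ m
    · rw [if_pos hle, if_neg (by omega : ¬((s.length : Int) - (o : Int) > m))]
      rw [PySem.List.slice_from s (by omega : (0:Int) ≤ (o : Int)), Int.toNat_natCast]
    · rw [if_neg hle, if_pos (by omega : (s.length : Int) - (o : Int) > m)]
      rw [pv_sel_step s o m hm ho]
      rcases hfind : ((pvTags.foldl (fun acc tag => acc ++ pvFindAll (s.drop o) tag) []).reverse).find?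
          (fun i => decide (i < m)) with _ | i
      · -- no usable cut: both sides cut at max_length
        have hchunk : PySem.List.slice s (some (o : Int)) (some ((o : Int) + m)) =
            PySem.List.slice (s.drop o) none (some m) := by
          rw [PySem.List.slice_toNat s (by omega) (by omega), PySem.List.slice_to _ (by omega : (0:Int) ≤ m)]
          rw [Int.toNat_natCast]
          congr 1
          omega
        have hrec : PySem.List.slice (s.drop o) (some m) none = s.drop (o + m.toNat) := by
          rw [PySem.List.slice_from _ (by omega : (0:Int) ≤ m), List.drop_drop]
        have hcast : (o : Int) + m = ((o + m.toNat : Nat) : Int) := by push_cast; omega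
        have key : pvSplitBAux fuel s ((o : Int) + m) m
              (acc ++ [PySem.List.slice s (some (o : Int)) (some ((o : Int) + m))]) =
            acc ++ (PySem.List.slice (s.drop o) none (some m) ::
              pvSplitA fuel (PySem.List.slice (s.drop o) (some m) none) m) := by
          rw [hchunk, hrec, hcast, ih s (o + m.toNat) m _ hm (by omega) (by omega)]
          simp
        rw [if_pos rfl]
        by_cases hpos : (pvTags.foldl (fun acc tag => acc ++ pvFindAll (s.drop o) tag) []).isEmpty
        · rw [if_pos hpos]
          exact key
        · rw [if_neg hpos]
          exact key
      · -- cut at the selected position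
        have hmem : i ∈ pvTags.foldl (fun acc tag => acc ++ pvFindAll (s.drop o) tag) [] := by
          have := List.mem_of_find?_eq_some hfind
          rwa [List.mem_reverse] at this
        obtain ⟨hi1, hi2⟩ := pv_pos_mem (s.drop o) i hmem
        have him : i < m := by
          have := List.find?_some hfind
          simpa using this
        rw [List.length_drop] at hi2
        have hne : ¬((o : Int) + i = -1) := by omega
        have hpos : ¬(pvTags.foldl (fun acc tag => acc ++ pvFindAll (s.drop o) tag) []).isEmpty := by
          intro hcon
          rw [List.isEmpty_iff] at hcon
          rw [hcon] at hmem
          simp at hmem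
        have hchunk : PySem.List.slice s (some (o : Int)) (some ((o : Int) + i)) =
            PySem.List.slice (s.drop o) none (some i) := by
          rw [PySem.List.slice_toNat s (by omega) (by omega), PySem.List.slice_to _ (by omega : (0:Int) ≤ i)]
          rw [Int.toNat_natCast]
          congr 1
          omega
        have hrec : PySem.List.slice (s.drop o) (some i) none = s.drop (o + i.toNat) := by
          rw [PySem.List.slice_from _ (by omega : (0:Int) ≤ i), List.drop_drop]
        have hcast : (o : Int) + i = ((o + i.toNat : Nat) : Int) := by push_cast; omega
        have key : pvSplitBAux fuel s ((o : Int) + i) m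
              (acc ++ [PySem.List.slice s (some (o : Int)) (some ((o : Int) + i))]) =
            acc ++ (PySem.List.slice (s.drop o) none (some i) ::
              pvSplitA fuel (PySem.List.slice (s.drop o) (some i) none) m) := by
          rw [hchunk, hrec, hcast, ih s (o + i.toNat) m _ hm (by omega) (by omega)]
          simp
        rw [if_neg hne, if_neg hpos]
        exact key

-- ===== VERDICT (by name: the statement is the Claim_ definition above) =====
theorem split_html_spec : Claim_equal_split_html := by
  intro text m _hdom hpre
  unfold Spec_split_html split_html split_html_alt
  rcases hpre with hm | hle
  · have h := pv_main (text.toList.length + 1) text.toList 0 m [] hm (Nat.zero_le _) (by omega)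
    simp only [Nat.cast_zero, List.drop_zero, List.nil_append] at h
    rw [h]
  · have hA : pvSplitA (text.toList.length + 1) text.toList m = [text.toList] := by
      unfold pvSplitA
      rw [if_pos (by simpa [PySem.Str.len] using hle)]
    have hB : pvSplitBAux (text.toList.length + 1) text.toList 0 m [] = [text.toList] := by
      unfold pvSplitBAux
      rw [if_neg (by simp [PySem.Str.len] at hle ⊢; omega)]
      simp [PySem.List.slice_from _ (le_refl (0:Int))]
    rw [hA, hB]
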